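-- pv_equiv track=rewrite | github.com/monizyzz/University | 2-year/Algorithmic Laboratory II/Introduction/hacker.py | numSplitter
-- ===== SOURCE A (Python) =====
-- def numSplitter(log,mail):
--     r = ["*"] * 16
--     n = 0
--     for num, ma in log:
--         for i in range(0,len(num)):
--             if ma == mail and num[i] != '*':
--                 if r[i] == '*':
--                     n += 1
--                 r[i] = num[i]
--     return ("".join(r),mail,n)
-- ===== SOURCE B (Python) =====
-- def numSplitter(log, mail):
--     # column-wise: filter matching entries once, then compute each of the
--     # 16 template positions independently (last non-'*' digit wins)
--     nums = [num for num, ma in log if ma == mail]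
--     r = []
--     for i in range(16):
--         d = '*'
--         for num in nums:
--             if i < len(num) and num[i] != '*':
--                 d = num[i]
--         r.append(d)
--     n = sum(1 for d in r if d != '*')
--     return ("".join(r), mail, n)
-- ===== Notes on version B (the rewrite author's own statement) =====
-- stated objective: alternative
-- what changed: transposes the nesting: filters the matching entries once, then computes each of the 16 template columns independently by an inner scan (last non-'*' digit wins), counting filled columns at the end instead of maintaining a running count and a mutable 16-slot buffer
import Mathlib
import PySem

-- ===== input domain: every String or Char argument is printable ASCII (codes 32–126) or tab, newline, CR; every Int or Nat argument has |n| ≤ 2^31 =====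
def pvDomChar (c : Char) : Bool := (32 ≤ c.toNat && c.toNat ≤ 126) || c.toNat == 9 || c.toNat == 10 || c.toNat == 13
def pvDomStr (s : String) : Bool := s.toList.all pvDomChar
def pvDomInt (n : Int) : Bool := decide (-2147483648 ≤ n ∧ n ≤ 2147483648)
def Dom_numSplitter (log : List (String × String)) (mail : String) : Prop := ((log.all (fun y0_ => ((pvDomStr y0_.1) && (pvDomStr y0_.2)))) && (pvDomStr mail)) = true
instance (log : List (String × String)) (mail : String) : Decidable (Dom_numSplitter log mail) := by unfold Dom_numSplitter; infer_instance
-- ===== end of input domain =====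

-- B re-implements A by transposing the loops (filter matching entries once, then
-- compute each of the 16 template columns independently and count filled columns
-- at the end); same cost, different decomposition. Equivalence proved on Pre_.

-- ===== PORT A =====
-- inner loop body: `if ma == mail and num[i] != '*': (if r[i]=='*': n+=1); r[i]=num[i]`
-- (where Python would raise IndexError on r[i] with i ≥ 16, i.e. outside Pre_, the
--  port reads '?' and lets List.set no-op; behaviour there is not claimed)
def innerA (mail : String) (num : List Char) (ma : String) (st : List Char × Int) (i : Nat) : List Char × Int :=
  if ma = mail ∧ num.getD i '*' ≠ '*' then
    (st.1.set i (num.getD i '*'), if st.1.getD i '?' = '*' then st.2 + 1 else st.2)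
  else st

-- `for i in range(0, len(num)): …`
def stepA (mail : String) (st : List Char × Int) (p : String × String) : List Char × Int :=
  (List.range p.1.toList.length).foldl (innerA mail p.1.toList p.2) st

def numSplitter (log : List (String × String)) (mail : String) : String × String × Int :=
  let st := log.foldl (stepA mail) (List.replicate 16 '*', 0)
  (String.mk st.1, mail, st.2)

-- ===== PORT B =====
-- `for num in nums: if i < len(num) and num[i] != '*': d = num[i]`
def colB (i : Nat) (d : Char) (num : String) : Char :=
  if i < num.toList.length ∧ num.toList.getD i '*' ≠ '*' then num.toList.getD i '*' else d

def numSplitter_alt (log : List (String × String)) (mail : String) : String × String × Int :=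
  let nums := (log.filter (fun p => p.2 == mail)).map (fun p => p.1)
  let r := (List.range 16).map (fun i => nums.foldl (colB i) '*')
  let n : Int := ((r.filter (fun c => c ≠ '*')).length : Int)
  (String.mk r, mail, n)

-- ===== PRECONDITION & SPEC =====
-- Pre_ excludes exactly the inputs where Python A raises IndexError: an entry whose
-- mail matches and whose num has a non-'*' character at an index ≥ 16 (r[i] out of range).
def Pre_numSplitter (log : List (String × String)) (mail : String) : Prop :=
  ∀ p ∈ log, p.2 = mail → ((p.1.toList.drop 16).all (fun c => c == '*')) = true
instance (log : List (String × String)) (mail : String) : Decidable (Pre_numSplitter log mail) := by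
  unfold Pre_numSplitter; infer_instance

def pvWitness_numSplitter : (List (String × String)) × String := ([("12*4", "m"), ("**3", "m"), ("999", "x")], "m")

def Spec_numSplitter (log : List (String × String)) (mail : String) (out : String × String × Int) : Prop := out = numSplitter_alt log mail
instance (log : List (String × String)) (mail : String) (out : String × String × Int) : Decidable (Spec_numSplitter log mail out) := by unfold Spec_numSplitter; infer_instance

-- ===== CLAIM (what is proved, stated in full; the proofs are below) =====
def Claim_equal_numSplitter : Prop := ∀ (log : List (String × String)) (mail : String), Dom_numSplitter log mail → Pre_numSplitter log mail → Spec_numSplitter log mail (numSplitter log mail)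


-- ===== LEMMAS AND PROOFS =====

-- column step over the raw log, with the mail guard folded in
def colStep (mail : String) (j : Nat) (d : Char) (p : String × String) : Char :=
  if p.2 = mail ∧ j < p.1.toList.length ∧ p.1.toList.getD j '*' ≠ '*' then p.1.toList.getD j '*' else d

def merge (mail : String) (r : List Char) (log : List (String × String)) : List Char :=
  (List.range 16).map (fun j => log.foldl (colStep mail j) (r.getD j '*'))

def cnt (r : List Char) : Int := (r.countP (fun c => c ≠ '*') : Int)

lemma getD_set (r : List Char) (i : Nat) (v : Char) (j : Nat) (d : Char) :
    (r.set i v).getD j d = if i = j ∧ j < r.length then v else r.getD j d := by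
  induction r generalizing i j with
  | nil => simp
  | cons a t ih =>
    cases i with
    | zero => cases j <;> simp
    | succ i' =>
      cases j with
      | zero => simp
      | succ j' => simpa [List.set, Nat.succ_lt_succ_iff, List.getD] using ih i' j'

lemma cnt_set (r : List Char) (i : Nat) (v : Char) (hv : v ≠ '*') :
    cnt (r.set i v) = if r.getD i '?' = '*' then cnt r + 1 else cnt r := by
  induction r generalizing i with
  | nil => simp [cnt]
  | cons a t ih =>
    cases i with
    | zero =>
      by_cases h : a = '*' <;> simp [cnt, List.countP_cons, h, hv, List.getD]
    | succ i' =>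
      have := ih i'
      by_cases h : a = '*' <;>
        simp only [List.set, List.getD_cons_succ, cnt, List.countP_cons, h] at * <;>
        split_ifs at * <;> simp_all
  
lemma foldl_pres {α β : Type} (P : α → Prop) (f : α → β → α)
    (h : ∀ a b, P a → P (f a b)) : ∀ (l : List β) (a : α), P a → P (l.foldl f a) := by
  intro l
  induction l with
  | nil => intro a pa; simpa
  | cons x xs ih => intro a pa; exact ih _ (h _ _ pa)

def StInv (st : List Char × Int) : Prop := st.2 = cnt st.1 ∧ st.1.length = 16

lemma innerA_pres (mail : String) (num : List Char) (ma : String) (st : List Char × Int) (i : Nat)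
    (h : StInv st) : StInv (innerA mail num ma st i) := by
  unfold innerA
  split_ifs with hc hn hn
  · exact ⟨by simp only; rw [cnt_set _ _ _ hc.2, if_pos hn, h.1], by simp [h.2]⟩
  · exact ⟨by simp only; rw [cnt_set _ _ _ hc.2, if_neg hn, h.1], by simp [h.2]⟩
  · exact h

lemma stepA_pres (mail : String) (st : List Char × Int) (p : String × String)
    (h : StInv st) : StInv (stepA mail st p) :=
  foldl_pres StInv _ (fun a b ha => innerA_pres mail _ _ a b ha) _ st h

lemma outer_pres (mail : String) (log : List (String × String)) (st : List Char × Int)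
    (h : StInv st) : StInv (log.foldl (stepA mail) st) :=
  foldl_pres StInv _ (fun a b ha => stepA_pres mail a b ha) log st h

lemma innerA_fst_len (mail : String) (num : List Char) (ma : String) (st : List Char × Int) (i : Nat) :
    (innerA mail num ma st i).1.length = st.1.length := by
  unfold innerA; split_ifs <;> simp

lemma range'_foldl_len (mail : String) (num : List Char) (ma : String) :
    ∀ (L : List Nat) (st : List Char × Int),
      (L.foldl (innerA mail num ma) st).1.length = st.1.length := by
  intro L
  induction L with
  | nil => intro st; rfl
  | cons x xs ih => intro st; rw [List.foldl_cons, ih, innerA_fst_len]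

lemma innerA_fold_getD (mail : String) (num : List Char) (ma : String) :
    ∀ (b a : Nat) (st : List Char × Int) (j : Nat) (d : Char),
      ((List.range' a b).foldl (innerA mail num ma) st).1.getD j d =
        if a ≤ j ∧ j < a + b ∧ j < st.1.length ∧ ma = mail ∧ num.getD j '*' ≠ '*'
        then num.getD j '*' else st.1.getD j d := by
  intro b
  induction b with
  | zero =>
    intro a st j d
    simp only [List.range'_zero, List.foldl_nil]
    split_ifs with h
    · omega
    · rfl
  | succ b' ih =>
    intro a st j d
    rw [List.range'_succ, List.foldl_cons]
    by_cases hcA : ma = mail ∧ num.getD a '*' ≠ '*'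
    · have hst : innerA mail num ma st a =
          (st.1.set a (num.getD a '*'), if st.1.getD a '?' = '*' then st.2 + 1 else st.2) := by
        unfold innerA; rw [if_pos hcA]
      rw [hst, ih]
      simp only [List.length_set]
      rw [getD_set]
      by_cases hja : j = a
      · subst hja
        have hcnot : ¬(j + 1 ≤ j ∧ j < j + 1 + b' ∧ j < st.1.length ∧ ma = mail ∧
            num.getD j '*' ≠ '*') := by rintro ⟨h, -⟩; omega
        rw [if_neg hcnot]
        by_cases hl : j < st.1.length
        · rw [if_pos ⟨rfl, hl⟩, if_pos ⟨by omega, by omega, hl, hcA.1, hcA.2⟩]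
        · rw [if_neg (fun h => hl h.2), if_neg (fun h => hl h.2.2.1)]
      · have hne : a ≠ j := fun h => hja h.symm
        rw [if_neg (show ¬(a = j ∧ j < st.1.length) from fun h => hne h.1)]
        have hiff : (a + 1 ≤ j ∧ j < a + 1 + b' ∧ j < st.1.length ∧ ma = mail ∧ num.getD j '*' ≠ '*') ↔
            (a ≤ j ∧ j < a + (b' + 1) ∧ j < st.1.length ∧ ma = mail ∧ num.getD j '*' ≠ '*') := by
          constructor
          · rintro ⟨x, y, p⟩; exact ⟨by omega, by omega, p⟩
          · rintro ⟨x, y, p⟩; exact ⟨by omega, by omega, p⟩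
        simp only [hiff]
    · have hst : innerA mail num ma st a = st := by
        unfold innerA; rw [if_neg hcA]
      rw [hst, ih]
      by_cases hja : j = a
      · subst hja
        have hcf : ¬(j ≤ j ∧ j < j + (b' + 1) ∧ j < st.1.length ∧ ma = mail ∧ num.getD j '*' ≠ '*') := by
          rintro ⟨-, -, -, h1, h2⟩; exact hcA ⟨h1, h2⟩
        have hcf' : ¬(j + 1 ≤ j ∧ j < j + 1 + b' ∧ j < st.1.length ∧ ma = mail ∧ num.getD j '*' ≠ '*') := by
          rintro ⟨h1, -⟩; omega
        rw [if_neg hcf', if_neg hcf]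
      · have hiff : (a + 1 ≤ j ∧ j < a + 1 + b' ∧ j < st.1.length ∧ ma = mail ∧ num.getD j '*' ≠ '*') ↔
            (a ≤ j ∧ j < a + (b' + 1) ∧ j < st.1.length ∧ ma = mail ∧ num.getD j '*' ≠ '*') := by
          constructor
          · rintro ⟨x, y, p⟩; exact ⟨by omega, by omega, p⟩
          · rintro ⟨x, y, p⟩; exact ⟨by omega, by omega, p⟩
        simp only [hiff]

lemma stepA_fst (mail : String) (st : List Char × Int) (p : String × String)
    (h16 : st.1.length = 16) :
    (stepA mail st p).1 = (List.range 16).map (fun j => colStep mail j (st.1.getD j '*') p) := by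
  apply List.ext_getElem
  · rw [stepA, range'_foldl_len]; simp [h16]
  · intro j hj hj2
    have hj16 : j < 16 := by simpa using hj2
    rw [← List.getD_eq_getElem _ '*' hj, stepA, List.range_eq_range', innerA_fold_getD]
    simp only [List.getElem_map, List.getElem_range]
    unfold colStep
    have hiff : (0 ≤ j ∧ j < 0 + p.1.toList.length ∧ j < st.1.length ∧ p.2 = mail ∧ p.1.toList.getD j '*' ≠ '*') ↔
        (p.2 = mail ∧ j < p.1.toList.length ∧ p.1.toList.getD j '*' ≠ '*') := by
      constructor
      · rintro ⟨-, h1, -, h2, h3⟩; exact ⟨h2, by omega, h3⟩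
      · rintro ⟨h2, h1, h3⟩; exact ⟨by omega, by omega, by omega, h2, h3⟩
    simp only [hiff]

lemma getD_map_range (f : Nat → Char) (j : Nat) (d : Char) (h : j < 16) :
    ((List.range 16).map f).getD j d = f j := by
  have hlen : j < ((List.range 16).map f).length := by simp [h]
  rw [List.getD_eq_getElem _ _ hlen]
  simp

lemma merge_nil (mail : String) (r : List Char) (h16 : r.length = 16) :
    merge mail r [] = r := by
  apply List.ext_getElem
  · simp [merge, h16]
  · intro j hj hj2
    simp only [merge, List.foldl_nil, List.getElem_map, List.getElem_range]
    exact List.getD_eq_getElem r '*' hj2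

lemma outer_fst (mail : String) :
    ∀ (log : List (String × String)) (st : List Char × Int), st.1.length = 16 →
      (log.foldl (stepA mail) st).1 = merge mail st.1 log := by
  intro log
  induction log with
  | nil => intro st h16; exact (merge_nil mail st.1 h16).symm
  | cons p rest ih =>
    intro st h16
    rw [List.foldl_cons]
    have hlen : (stepA mail st p).1.length = 16 := by rw [stepA, range'_foldl_len, h16]
    rw [ih _ hlen, stepA_fst mail st p h16]
    unfold merge
    apply List.map_congr_left
    intro j hj
    have hj16 : j < 16 := List.mem_range.mp hj
    rw [getD_map_range _ _ _ hj16, List.foldl_cons]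

lemma cnt_replicate : cnt (List.replicate 16 '*') = 0 := by decide

lemma A_char (log : List (String × String)) (mail : String) :
    numSplitter log mail =
      (String.mk (merge mail (List.replicate 16 '*') log), mail,
        cnt (merge mail (List.replicate 16 '*') log)) := by
  have hInv : StInv (log.foldl (stepA mail) (List.replicate 16 '*', (0 : Int))) :=
    outer_pres mail log _ ⟨by simpa [cnt] using cnt_replicate.symm, by simp⟩
  have hfst := outer_fst mail log (List.replicate 16 '*', (0 : Int)) (by simp)
  unfold numSplitter
  simp only
  rw [hInv.1, hfst]

lemma B_char (log : List (String × String)) (mail : String) :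
    numSplitter_alt log mail =
      (String.mk (merge mail (List.replicate 16 '*') log), mail,
        cnt (merge mail (List.replicate 16 '*') log)) := by
  unfold numSplitter_alt
  have hr : (List.range 16).map
      (fun i => (((log.filter (fun p => p.2 == mail)).map (fun p => p.1)).foldl (colB i) '*')) =
      merge mail (List.replicate 16 '*') log := by
    unfold merge
    apply List.map_congr_left
    intro j hj
    have hj16 : j < 16 := List.mem_range.mp hj
    rw [List.foldl_map, List.foldl_filter, List.getD_replicate _ hj16]
    congr 1
    funext d p
    by_cases hm : p.2 = mail
    · rw [if_pos (by simp [hm])]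
      unfold colB colStep
      by_cases hc : j < p.1.toList.length ∧ p.1.toList.getD j '*' ≠ '*'
      · rw [if_pos hc, if_pos ⟨hm, hc.1, hc.2⟩]
      · rw [if_neg hc, if_neg (fun h => hc ⟨h.2.1, h.2.2⟩)]
    · rw [if_neg (by simp [hm])]
      unfold colStep
      rw [if_neg (fun h => hm h.1)]
  simp only
  rw [hr]
  congr 1
  simp [cnt, List.countP_eq_length_filter]

-- ===== VERDICT (by name: the statement is the Claim_ definition above) =====
theorem numSplitter_spec : Claim_equal_numSplitter := by
  intro log mail _ _
  unfold Spec_numSplitter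
  rw [A_char, B_char]
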